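-- pv_equiv track=rewrite | github.com/tpavic1/ABI | chapter6/BA6D.py | ColoredEdges
-- ===== SOURCE A (Python) =====
-- def ChromosomeToCycle(kromosom):
--     nodes=[]
--     for el in kromosom:
--         if el>0:
--             nodes.append(2*el-1)
--             nodes.append(2*el)
--         else:
--             nodes.append(-2*el)
--             nodes.append(-2*el-1)
--     return nodes
--
-- def ColoredEdges(P):
--     edges=[]
--     for kromosom in P:
--         nodes=ChromosomeToCycle(kromosom)
--         for j in range(1,len(nodes),2):
--             if j!=len(nodes)-1:
--                 edges.append([nodes[j],nodes[j+1]])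
--             else:
--                 edges.append([nodes[j],nodes[0]])
--     return edges
-- ===== SOURCE B (Python) =====
-- def ColoredEdges(P):
--     edges = []
--     for kromosom in P:
--         heads = []
--         tails = []
--         for e in kromosom:
--             if e > 0:
--                 heads.append(2 * e - 1)
--                 tails.append(2 * e)
--             else:
--                 heads.append(-2 * e)
--                 tails.append(-2 * e - 1)
--         n = len(kromosom)
--         for i in range(n):
--             edges.append([tails[i], heads[(i + 1) % n]])
--     return edges
-- ===== Notes on version B (the rewrite author's own statement) =====
-- stated objective: alternative
-- what changed: Replaces the flattened node list with its stride-2 index loop and last-index special case by per-block head/tail lists joined with a cyclic (i+1) mod n pairing.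
import Mathlib
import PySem

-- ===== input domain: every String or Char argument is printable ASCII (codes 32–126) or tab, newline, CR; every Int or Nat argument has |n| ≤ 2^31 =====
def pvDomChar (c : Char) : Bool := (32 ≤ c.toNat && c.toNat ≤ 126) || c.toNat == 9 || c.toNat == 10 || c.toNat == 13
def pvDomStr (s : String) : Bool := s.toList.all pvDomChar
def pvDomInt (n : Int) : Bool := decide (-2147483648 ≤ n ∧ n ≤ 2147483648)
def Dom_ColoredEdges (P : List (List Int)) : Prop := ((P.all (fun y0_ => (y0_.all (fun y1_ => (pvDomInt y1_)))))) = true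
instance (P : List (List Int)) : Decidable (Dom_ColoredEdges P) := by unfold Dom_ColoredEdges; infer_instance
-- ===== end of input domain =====

-- B replaces A's flattened node list, stride-2 index loop and last-index special case by
-- per-block head/tail lists joined with a cyclic (i+1) mod n pairing (alternative decomposition, same cost).

-- ===== PORT A =====
def ChromosomeToCycle (kromosom : List Int) : List Int :=
  kromosom.foldl (fun nodes el =>
    if el > 0 then (nodes ++ [2 * el - 1]) ++ [2 * el]
    else (nodes ++ [-2 * el]) ++ [-2 * el - 1]) []

def ColoredEdges (P : List (List Int)) : List (List Int) :=
  P.foldl (fun edges kromosom =>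
    let nodes := ChromosomeToCycle kromosom
    (PySem.List.pyRange 1 (nodes.length : Int) 2).foldl (fun edges j =>
      if j ≠ (nodes.length : Int) - 1 then
        edges ++ [[PySem.List.pyGetD nodes j 0, PySem.List.pyGetD nodes (j + 1) 0]]
      else
        edges ++ [[PySem.List.pyGetD nodes j 0, PySem.List.pyGetD nodes 0 0]]) edges) []

-- ===== PORT B =====
def ColoredEdges_alt (P : List (List Int)) : List (List Int) :=
  P.foldl (fun edges kromosom =>
    let ht := kromosom.foldl (fun (ht : List Int × List Int) e =>
      if e > 0 then (ht.1 ++ [2 * e - 1], ht.2 ++ [2 * e])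
      else (ht.1 ++ [-2 * e], ht.2 ++ [-2 * e - 1])) ([], [])
    let n : Int := (kromosom.length : Int)
    (PySem.List.pyRange 0 n 1).foldl (fun edges i =>
      edges ++ [[PySem.List.pyGetD ht.2 i 0,
                 PySem.List.pyGetD ht.1 (PySem.Int.mod (i + 1) n) 0]]) edges) []

-- ===== PRECONDITION & SPEC =====
def Spec_ColoredEdges (P : List (List Int)) (out : List (List Int)) : Prop := out = ColoredEdges_alt P
instance (P : List (List Int)) (out : List (List Int)) : Decidable (Spec_ColoredEdges P out) := by unfold Spec_ColoredEdges; infer_instance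

-- ===== CLAIM (what is proved, stated in full; the proofs are below) =====
def Claim_equal_ColoredEdges : Prop := ∀ (P : List (List Int)), Dom_ColoredEdges P → Spec_ColoredEdges P (ColoredEdges P)

-- ===== LEMMAS AND PROOFS =====

/-- head endpoint of a block -/
def pvHd (e : Int) : Int := if e > 0 then 2 * e - 1 else -2 * e
/-- tail endpoint of a block -/
def pvTl (e : Int) : Int := if e > 0 then 2 * e else -2 * e - 1
/-- the node list of a chromosome, as a flatMap -/
def pvNodes (k : List Int) : List Int := k.flatMap (fun e => [pvHd e, pvTl e])

theorem chromosomeToCycle_eq (k : List Int) : ChromosomeToCycle k = pvNodes k := by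
  have h : ∀ acc, k.foldl (fun nodes el =>
      if el > 0 then (nodes ++ [2 * el - 1]) ++ [2 * el]
      else (nodes ++ [-2 * el]) ++ [-2 * el - 1]) acc = acc ++ pvNodes k := by
    induction k with
    | nil => intro acc; simp [pvNodes]
    | cons e rest ih =>
      intro acc
      simp only [List.foldl_cons, ih, pvNodes, List.flatMap_cons, pvHd, pvTl]
      by_cases he : e > 0 <;> simp [he]
  simpa [ChromosomeToCycle] using h []

theorem ht_eq (k : List Int) :
    k.foldl (fun (ht : List Int × List Int) e =>
      if e > 0 then (ht.1 ++ [2 * e - 1], ht.2 ++ [2 * e])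
      else (ht.1 ++ [-2 * e], ht.2 ++ [-2 * e - 1])) ([], [])
      = (k.map pvHd, k.map pvTl) := by
  have h : ∀ a b, k.foldl (fun (ht : List Int × List Int) e =>
      if e > 0 then (ht.1 ++ [2 * e - 1], ht.2 ++ [2 * e])
      else (ht.1 ++ [-2 * e], ht.2 ++ [-2 * e - 1])) (a, b)
      = (a ++ k.map pvHd, b ++ k.map pvTl) := by
    induction k with
    | nil => intro a b; simp
    | cons e rest ih =>
      intro a b
      by_cases he : e > 0
      · rw [List.foldl_cons, if_pos he, ih]
        simp [pvHd, pvTl, he]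
      · rw [List.foldl_cons, if_neg he, ih]
        simp [pvHd, pvTl, he]
  simpa using h [] []

theorem pvNodes_length (k : List Int) : (pvNodes k).length = 2 * k.length := by
  induction k with
  | nil => simp [pvNodes]
  | cons e rest ih => simp [pvNodes, List.flatMap_cons] at *; omega

theorem pvNodes_getD (k : List Int) : ∀ i : Nat, i < k.length →
    (pvNodes k).getD (2 * i) 0 = pvHd (k.getD i 0) ∧
    (pvNodes k).getD (2 * i + 1) 0 = pvTl (k.getD i 0) := by
  induction k with
  | nil => intro i hi; simp at hi
  | cons e rest ih =>
    intro i hi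
    cases i with
    | zero => simp [pvNodes, List.flatMap_cons]
    | succ m =>
      have hm : m < rest.length := by simpa using hi
      have h2 : 2 * (m + 1) = 2 * m + 2 := by omega
      simp only [pvNodes, List.flatMap_cons, h2, List.cons_append]
      have := ih m hm
      simpa [pvNodes, List.getD] using this

theorem getD_map_lt (f : Int → Int) (k : List Int) (i : Nat) (hi : i < k.length) :
    (k.map f).getD i 0 = f (k.getD i 0) := by
  simp [List.getD, List.getElem?_map, List.getElem?_eq_getElem hi]

theorem pyRange_stride2 (n : Nat) :
    PySem.List.pyRange 1 ((2 * n : Nat) : Int) 2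
      = (List.range n).map (fun i : Nat => 1 + 2 * (i : Int)) := by
  rw [PySem.List.pyRange_of_pos _ _ (by norm_num)]
  have hc : (if (1:Int) < ((2 * n : Nat) : Int)
      then ((((2 * n : Nat) : Int) - 1 + 2 - 1) / 2).toNat else 0) = n := by
    rcases Nat.eq_zero_or_pos n with h | h
    · simp [h]
    · rw [if_pos (by push_cast; omega)]
      have h2 : (((2 * n : Nat) : Int) - 1 + 2 - 1) = 2 * (n : Int) := by push_cast; ring
      rw [h2, Int.mul_ediv_cancel_left _ (by norm_num)]
      simp
  rw [hc]

theorem fmod_lt_self (a b : Int) (h : 0 ≤ a) (h2 : a < b) : PySem.Int.mod a b = a := by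
  unfold PySem.Int.mod
  rw [Int.fmod_eq_emod, if_pos (Or.inl (by omega)), Int.emod_eq_of_lt h h2]; ring

theorem inner_eq (edges : List (List Int)) (k : List Int) :
    (let nodes := ChromosomeToCycle k
     (PySem.List.pyRange 1 (nodes.length : Int) 2).foldl (fun edges j =>
      if j ≠ (nodes.length : Int) - 1 then
        edges ++ [[PySem.List.pyGetD nodes j 0, PySem.List.pyGetD nodes (j + 1) 0]]
      else
        edges ++ [[PySem.List.pyGetD nodes j 0, PySem.List.pyGetD nodes 0 0]]) edges)
    = (let ht := k.foldl (fun (ht : List Int × List Int) e =>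
        if e > 0 then (ht.1 ++ [2 * e - 1], ht.2 ++ [2 * e])
        else (ht.1 ++ [-2 * e], ht.2 ++ [-2 * e - 1])) ([], [])
       let n : Int := (k.length : Int)
       (PySem.List.pyRange 0 n 1).foldl (fun edges i =>
        edges ++ [[PySem.List.pyGetD ht.2 i 0,
                   PySem.List.pyGetD ht.1 (PySem.Int.mod (i + 1) n) 0]]) edges) := by
  simp only [chromosomeToCycle_eq, ht_eq]
  set nodes := pvNodes k with hnodes
  have hlen : nodes.length = 2 * k.length := pvNodes_length k
  set n := k.length with hn
  -- both folds append one element per step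
  have hA : ∀ (acc : List (List Int)),
      (PySem.List.pyRange 1 (nodes.length : Int) 2).foldl (fun edges j =>
        if j ≠ (nodes.length : Int) - 1 then
          edges ++ [[PySem.List.pyGetD nodes j 0, PySem.List.pyGetD nodes (j + 1) 0]]
        else
          edges ++ [[PySem.List.pyGetD nodes j 0, PySem.List.pyGetD nodes 0 0]]) acc
      = acc ++ (PySem.List.pyRange 1 (nodes.length : Int) 2).map (fun j =>
          if j ≠ (nodes.length : Int) - 1 then
            [PySem.List.pyGetD nodes j 0, PySem.List.pyGetD nodes (j + 1) 0]
          else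
            [PySem.List.pyGetD nodes j 0, PySem.List.pyGetD nodes 0 0]) := by
    intro acc
    have := PySem.List.foldl_append_singleton_eq_map (fun j =>
        if j ≠ (nodes.length : Int) - 1 then
          [PySem.List.pyGetD nodes j 0, PySem.List.pyGetD nodes (j + 1) 0]
        else
          [PySem.List.pyGetD nodes j 0, PySem.List.pyGetD nodes 0 0])
        (PySem.List.pyRange 1 (nodes.length : Int) 2) acc
    rw [← this]
    apply PySem.List.foldl_congr_mem
    intro a j _
    by_cases hj : j ≠ (nodes.length : Int) - 1 <;> simp [hj]
  have hB : ∀ (acc : List (List Int)),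
      (PySem.List.pyRange 0 (n : Int) 1).foldl (fun edges i =>
        edges ++ [[PySem.List.pyGetD (k.map pvTl) i 0,
                   PySem.List.pyGetD (k.map pvHd) (PySem.Int.mod (i + 1) (n : Int)) 0]]) acc
      = acc ++ (PySem.List.pyRange 0 (n : Int) 1).map (fun i =>
          [PySem.List.pyGetD (k.map pvTl) i 0,
           PySem.List.pyGetD (k.map pvHd) (PySem.Int.mod (i + 1) (n : Int)) 0]) :=
    fun acc => PySem.List.foldl_append_singleton_eq_map _ _ acc
  rw [hA, hB]
  congr 1
  -- rewrite both ranges as maps over List.range n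
  rw [hlen, pyRange_stride2 n, PySem.List.pyRange_zero_nat n, List.map_map, List.map_map]
  apply List.map_congr_left
  intro i hi
  have hi' : i < n := List.mem_range.mp hi
  simp only [Function.comp]
  -- index facts
  have hidx1 : (1 + 2 * (i : Int)) = ((2 * i + 1 : Nat) : Int) := by push_cast; ring
  have hidx2 : (((2 * i + 1 : Nat) : Int) + 1) = ((2 * (i + 1) : Nat) : Int) := by push_cast; ring
  by_cases hlast : i + 1 < n
  · have hcond : (1 + 2 * (i : Int)) ≠ ((2 * n : Nat) : Int) - 1 := by
      push_cast; omega
    rw [if_pos hcond, hidx1, hidx2,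
        PySem.List.pyGetD_natCast, PySem.List.pyGetD_natCast]
    rw [show (2 * i + 1) = 2 * i + 1 from rfl, (pvNodes_getD k i hi').2]
    have h2 := (pvNodes_getD k (i + 1) hlast).1
    rw [show 2 * (i+1) = 2 * (i+1) from rfl] at h2
    rw [h2]
    have hmod : PySem.Int.mod ((i : Int) + 1) (n : Int) = (((i + 1 : Nat)) : Int) := by
      rw [fmod_lt_self _ _ (by positivity) (by omega)]; push_cast; ring
    rw [hmod, PySem.List.pyGetD_natCast, PySem.List.pyGetD_natCast,
        getD_map_lt pvTl k i hi', getD_map_lt pvHd k (i + 1) hlast]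
  · have hcond : ¬ (1 + 2 * (i : Int)) ≠ ((2 * n : Nat) : Int) - 1 := by
      push_cast; omega
    have hn0 : 0 < n := by omega
    rw [if_neg hcond, hidx1, PySem.List.pyGetD_natCast, (pvNodes_getD k i hi').2]
    have hk0 : PySem.List.pyGetD nodes (0 : Int) (0 : Int) = pvHd (k.getD 0 0) := by
      simpa [PySem.List.pyGetD_zero] using (pvNodes_getD k 0 hn0).1
    rw [hk0]
    have hmod : PySem.Int.mod ((i : Int) + 1) (n : Int) = (0 : Int) := by
      have hin : (i : Int) + 1 = (n : Int) := by omega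
      rw [hin]; unfold PySem.Int.mod; simp [Int.fmod_self]
    rw [hmod, PySem.List.pyGetD_natCast, getD_map_lt pvTl k i hi']
    have hh0 : PySem.List.pyGetD (k.map pvHd) (0 : Int) (0 : Int) = pvHd (k.getD 0 0) := by
      simpa [PySem.List.pyGetD_zero] using getD_map_lt pvHd k 0 hn0
    rw [hh0]

-- ===== VERDICT (by name: the statement is the Claim_ definition above) =====
theorem ColoredEdges_spec : Claim_equal_ColoredEdges := by
  intro P _
  unfold Spec_ColoredEdges ColoredEdges ColoredEdges_alt
  apply PySem.List.foldl_congr_mem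
  intro acc k _
  exact inner_eq acc k
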